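-- pv_equiv track=rewrite | github.com/GaokaiZhang/CS-Drafting | fixed_window.py | _take_segments_prefix
-- ===== SOURCE A (Python) =====
-- def _append_segment(segments, source_model, count):
--     if count <= 0:
--         return
--     if segments and segments[-1][0] == source_model:
--         segments[-1] = (source_model, segments[-1][1] + count)
--     else:
--         segments.append((source_model, count))
--
-- def _take_segments_prefix(segments, limit):
--     out = []
--     remaining = limit
--     for source_model, count in segments:
--         if remaining <= 0:
--             break
--         take = min(count, remaining)
--         _append_segment(out, source_model, take)
--         remaining -= take
--     return out
-- ===== SOURCE B (Python) =====
-- def _take_segments_prefix(segments, limit):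
--     # Pass 1: truncate to the limit, recording positive takes only.
--     # (remaining is decremented by take even when take <= 0, as the spec of
--     # the truncation: a non-positive count consumes a non-positive amount.)
--     raw = []
--     remaining = limit
--     for source_model, count in segments:
--         if remaining <= 0:
--             break
--         take = min(count, remaining)
--         if take > 0:
--             raw.append((source_model, take))
--         remaining -= take
--     # Pass 2: coalesce consecutive runs of the same model, summing counts.
--     out = []
--     i = 0
--     n = len(raw)
--     while i < n:
--         model = raw[i][0]
--         total = 0
--         j = i
--         while j < n and raw[j][0] == model:
--             total += raw[j][1]
--             j += 1
--         out.append((model, total))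
--         i = j
--     return out
-- ===== Notes on version B (the rewrite author's own statement) =====
-- stated objective: alternative
-- what changed: B splits A's single interleaved loop into two passes: first truncate to the limit producing a raw list of positive takes, then coalesce consecutive same-model runs by summing each run, instead of merging into the output's last element on every append.
import Mathlib
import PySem

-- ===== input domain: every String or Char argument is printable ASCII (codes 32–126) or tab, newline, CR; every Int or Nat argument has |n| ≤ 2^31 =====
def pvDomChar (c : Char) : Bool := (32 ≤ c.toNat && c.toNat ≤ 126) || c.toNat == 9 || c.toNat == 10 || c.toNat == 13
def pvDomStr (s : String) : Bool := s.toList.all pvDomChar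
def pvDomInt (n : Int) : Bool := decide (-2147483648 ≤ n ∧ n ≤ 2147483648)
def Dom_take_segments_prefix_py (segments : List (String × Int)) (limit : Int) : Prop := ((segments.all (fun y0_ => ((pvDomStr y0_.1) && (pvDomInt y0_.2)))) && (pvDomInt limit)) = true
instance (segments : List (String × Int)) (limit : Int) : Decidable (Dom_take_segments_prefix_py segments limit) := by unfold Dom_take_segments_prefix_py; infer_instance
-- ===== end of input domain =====

-- B splits A's single interleaved loop into two passes (truncate, then coalesce
-- consecutive same-model runs); alternative decomposition, same cost.

-- ===== PORT A =====
-- _append_segment: mutates the list; ported as a function returning the new list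
def appendSegmentA (segs : List (String × Int)) (source_model : String) (count : Int) : List (String × Int) :=
  if count ≤ 0 then segs
  else
    match segs.getLast? with
    | some last =>
        if last.1 == source_model then
          segs.dropLast ++ [(source_model, last.2 + count)]
        else
          segs ++ [(source_model, count)]
    | none => segs ++ [(source_model, count)]

-- the for-loop of _take_segments_prefix, with `out` and `remaining` as state
def loopA (segments : List (String × Int)) (out : List (String × Int)) (remaining : Int) : List (String × Int) :=
  match segments with
  | [] => out
  | (source_model, count) :: rest =>
      if remaining ≤ 0 then out
      else
        let take := min count remaining
        loopA rest (appendSegmentA out source_model take) (remaining - take)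

def take_segments_prefix_py (segments : List (String × Int)) (limit : Int) : List (String × Int) :=
  loopA segments [] limit

-- ===== PORT B =====
-- pass 1: truncate to the limit, keeping positive takes only
def loopRawB (segments : List (String × Int)) (remaining : Int) : List (String × Int) :=
  match segments with
  | [] => []
  | (source_model, count) :: rest =>
      if remaining ≤ 0 then []
      else
        let take := min count remaining
        (if 0 < take then [(source_model, take)] else []) ++ loopRawB rest (remaining - take)

-- inner while of pass 2: sum the run of entries with model `m`, return (total, rest)
def sumRunB (m : String) (acc : Int) (l : List (String × Int)) : Int × List (String × Int) :=
  match l with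
  | [] => (acc, [])
  | (m', c) :: rest => if m' == m then sumRunB m (acc + c) rest else (acc, (m', c) :: rest)

theorem sumRunB_len_le (m : String) (acc : Int) (l : List (String × Int)) :
    (sumRunB m acc l).2.length ≤ l.length := by
  induction l generalizing acc with
  | nil => simp [sumRunB]
  | cons p rest ih =>
      obtain ⟨m', c⟩ := p
      simp only [sumRunB]
      split
      · exact le_trans (ih _) (Nat.le_succ _)
      · simp

-- outer while of pass 2: coalesce consecutive runs
def mergeRunsB (l : List (String × Int)) : List (String × Int) :=
  match l with
  | [] => []
  | (m, c) :: rest =>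
      let p := sumRunB m c rest
      (m, p.1) :: mergeRunsB p.2
termination_by l.length
decreasing_by
  exact Nat.lt_succ_of_le (sumRunB_len_le m c rest)

def take_segments_prefix_py_alt (segments : List (String × Int)) (limit : Int) : List (String × Int) :=
  mergeRunsB (loopRawB segments limit)

-- ===== PRECONDITION & SPEC =====
def Spec_take_segments_prefix_py (segments : List (String × Int)) (limit : Int) (out : List (String × Int)) : Prop := out = take_segments_prefix_py_alt segments limit
instance (segments : List (String × Int)) (limit : Int) (out : List (String × Int)) : Decidable (Spec_take_segments_prefix_py segments limit out) := by unfold Spec_take_segments_prefix_py; infer_instance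

-- ===== CLAIM (what is proved, stated in full; the proofs are below) =====
def Claim_equal_take_segments_prefix_py : Prop := ∀ (segments : List (String × Int)) (limit : Int), Dom_take_segments_prefix_py segments limit → Spec_take_segments_prefix_py segments limit (take_segments_prefix_py segments limit)

-- ===== LEMMAS AND PROOFS =====

-- A's loop is the fold of appendSegmentA over B's raw list (non-positive takes
-- are dropped in raw, on which appendSegmentA is the identity anyway).
theorem loopA_eq_foldl_raw (segments : List (String × Int)) (out : List (String × Int)) (remaining : Int) :
    loopA segments out remaining =
      (loopRawB segments remaining).foldl (fun o p => appendSegmentA o p.1 p.2) out := by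
  induction segments generalizing out remaining with
  | nil => simp [loopA, loopRawB]
  | cons p rest ih =>
      obtain ⟨m, c⟩ := p
      by_cases h : remaining ≤ 0
      · simp [loopA, loopRawB, h]
      · simp only [loopA, loopRawB, if_neg h]
        by_cases hp : 0 < min c remaining
        · simp [hp, ih]
        · have : appendSegmentA out m (min c remaining) = out := by
            simp [appendSegmentA, not_lt.mp hp]
          simp [hp, ih, this]

-- every count in B's raw list is positive
theorem loopRawB_pos (segments : List (String × Int)) (remaining : Int) :
    ∀ p ∈ loopRawB segments remaining, 0 < p.2 := by
  induction segments generalizing remaining with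
  | nil => simp [loopRawB]
  | cons q rest ih =>
      obtain ⟨m, c⟩ := q
      intro p hp
      by_cases h : remaining ≤ 0
      · simp [loopRawB, h] at hp
      · simp only [loopRawB, if_neg h] at hp
        by_cases hpos : 0 < min c remaining
        · simp only [if_pos hpos, List.cons_append, List.nil_append, List.mem_cons] at hp
          rcases hp with rfl | hp
          · exact hpos
          · exact ih _ _ hp
        · simp only [if_neg hpos, List.nil_append] at hp
          exact ih _ _ hp

-- appendSegmentA only touches the last element: a nonempty accumulator suffix factors out
theorem foldl_append_factor (l raw : List (String × Int)) (out : List (String × Int)) (hne : l ≠ []) :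
    raw.foldl (fun o p => appendSegmentA o p.1 p.2) (out ++ l) =
      out ++ raw.foldl (fun o p => appendSegmentA o p.1 p.2) l := by
  induction raw generalizing l with
  | nil => simp
  | cons q rest ih =>
      obtain ⟨m, c⟩ := q
      have hstep : appendSegmentA (out ++ l) m c = out ++ appendSegmentA l m c := by
        unfold appendSegmentA
        by_cases hc : c ≤ 0
        · simp [hc]
        · simp only [if_neg hc]
          rw [List.getLast?_append_of_ne_nil out hne]
          match l, hne with
          | a :: t, _ =>
            cases hh : ((a :: t).getLast?) with
            | none => simp at hh
            | some last =>
                simp only []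
                split
                · rw [List.dropLast_append_of_ne_nil (by simp)]
                  simp
                · simp
      have hne' : appendSegmentA l m c ≠ [] := by
        unfold appendSegmentA
        by_cases hc : c ≤ 0
        · simpa [hc]
        · simp only [if_neg hc]
          match l, hne with
          | a :: t, _ =>
            cases hh : ((a :: t).getLast?) with
            | none => simp at hh
            | some last =>
                simp only []
                split
                · simp
                · simp
      simp only [List.foldl_cons, hstep]
      exact ih _ hne'

theorem mergeRunsB_cons (m : String) (c : Int) (rest : List (String × Int)) :
    mergeRunsB ((m, c) :: rest) = (m, (sumRunB m c rest).1) :: mergeRunsB (sumRunB m c rest).2 := by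
  rw [mergeRunsB.eq_def]

-- the fold of appendSegmentA over an all-positive run starting from [(m, acc)] sums the run
theorem foldl_run (n : Nat) (l : List (String × Int)) (hn : l.length ≤ n)
    (hpos : ∀ p ∈ l, 0 < p.2) (m : String) (acc : Int) :
    l.foldl (fun o p => appendSegmentA o p.1 p.2) [(m, acc)] =
      (m, (sumRunB m acc l).1) :: mergeRunsB (sumRunB m acc l).2 := by
  induction n generalizing l acc m with
  | zero =>
      match l, hn with
      | [], _ => simp [sumRunB, mergeRunsB]
  | succ n ih =>
      match l with
      | [] => simp [sumRunB, mergeRunsB]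
      | (m', c) :: rest =>
          have hc : 0 < c := hpos (m', c) (by simp)
          have hpos' : ∀ p ∈ rest, 0 < p.2 := fun p hp => hpos p (by simp [hp])
          by_cases hm : m' == m
          · have hstep : appendSegmentA [(m, acc)] m' c = [(m, acc + c)] := by
              have : m' = m := by simpa using hm
              simp [appendSegmentA, not_le.mpr hc, this]
            simp only [List.foldl_cons, hstep, sumRunB, if_pos hm]
            exact ih rest (by simpa using Nat.le_of_succ_le_succ hn) hpos' m (acc + c)
          · have hstep : appendSegmentA [(m, acc)] m' c = [(m, acc), (m', c)] := by
              have hne2 : ((m : String) == m') = false := by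
                rw [beq_eq_false_iff_ne]
                intro h
                exact hm (by simp [h])
              simp [appendSegmentA, not_le.mpr hc, hne2]
            simp only [List.foldl_cons, hstep, sumRunB]
            rw [if_neg hm]
            rw [show ([(m, acc), (m', c)] : List (String × Int)) = [(m, acc)] ++ [(m', c)] by rfl]
            rw [foldl_append_factor _ _ _ (by simp)]
            rw [ih rest (by simpa using Nat.le_of_succ_le_succ hn) hpos' m' c]
            rw [mergeRunsB_cons]
            simp

-- folding appendSegmentA over an all-positive list from [] is run-coalescing
theorem foldl_eq_mergeRuns (l : List (String × Int)) (hpos : ∀ p ∈ l, 0 < p.2) :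
    l.foldl (fun o p => appendSegmentA o p.1 p.2) [] = mergeRunsB l := by
  match l with
  | [] => simp [mergeRunsB]
  | (m, c) :: rest =>
      have hc : 0 < c := hpos (m, c) (by simp)
      have hstep : appendSegmentA [] m c = [(m, c)] := by
        simp [appendSegmentA, not_le.mpr hc]
      simp only [List.foldl_cons, hstep]
      rw [foldl_run rest.length rest le_rfl (fun p hp => hpos p (by simp [hp])) m c]
      rw [mergeRunsB_cons]

-- ===== VERDICT (by name: the statement is the Claim_ definition above) =====
theorem take_segments_prefix_py_spec : Claim_equal_take_segments_prefix_py := by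
  intro segments limit _
  unfold Spec_take_segments_prefix_py take_segments_prefix_py take_segments_prefix_py_alt
  rw [loopA_eq_foldl_raw]
  exact foldl_eq_mergeRuns _ (loopRawB_pos segments limit)
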